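-- pv_equiv track=rewrite | github.com/NeuroFlame/nfc-label-noise-filtering | src/complete_random_forest/crf_helpers.py | check_label_sequence
-- ===== SOURCE A (Python) =====
-- def check_label_sequence(labels) -> int:
--     n = len(labels)
--     if n < 2:
--         return 0
--
--     ch1 = None
--     for i in range(n - 1):
--         if labels[i] != labels[i + 1]:
--             ch1 = i
--             break
--     if ch1 is None:
--         return 0
--
--     for j in range(ch1 + 1, n - 1):
--         if labels[j] != labels[j + 1]:
--             return j - ch1
--     return (n - 1) - ch1
-- ===== SOURCE B (Python) =====
-- from itertools import groupby
--
-- def check_label_sequence(labels) -> int: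
--     runs = [sum(1 for _ in g) for _, g in groupby(labels)]
--     return runs[1] if len(runs) >= 2 else 0
-- ===== Notes on version B (the rewrite author's own statement) =====
-- stated objective: simpler
-- what changed: Replaced A's two sequential change-index scans (find first change, then scan on for the second) by a single run-length decomposition of the list via itertools.groupby, returning the length of the second run, which equals the distance between the first two adjacent changes in every case.
import Mathlib
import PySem

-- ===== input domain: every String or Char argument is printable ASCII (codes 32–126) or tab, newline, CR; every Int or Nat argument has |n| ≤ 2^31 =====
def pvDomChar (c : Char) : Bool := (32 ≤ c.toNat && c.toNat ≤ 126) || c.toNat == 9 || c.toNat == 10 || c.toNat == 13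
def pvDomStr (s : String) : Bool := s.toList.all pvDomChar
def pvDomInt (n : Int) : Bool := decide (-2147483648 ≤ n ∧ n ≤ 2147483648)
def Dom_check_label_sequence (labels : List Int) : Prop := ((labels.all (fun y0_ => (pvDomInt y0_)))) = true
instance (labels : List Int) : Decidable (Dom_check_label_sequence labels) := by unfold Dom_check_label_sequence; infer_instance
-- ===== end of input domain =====

-- B replaces A's two explicit change-index scans by a single run-length decomposition
-- (groupby) and returns the second run's length; objective: simpler.

-- ===== PORT A =====
-- the shared shape of A's two scan loops: first index i in idxs with labels[i] != labels[i+1]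
def pvFindCh (labels : List Int) : List Int → Option Int
  | [] => none
  | i :: rest =>
      if PySem.List.pyGet? labels i ≠ PySem.List.pyGet? labels (i + 1) then some i
      else pvFindCh labels rest

def check_label_sequence (labels : List Int) : Int :=
  let n : Int := labels.length
  if n < 2 then 0
  else
    match pvFindCh labels (PySem.List.pyRange 0 (n - 1) 1) with
    | none => 0
    | some ch1 =>
        match pvFindCh labels (PySem.List.pyRange (ch1 + 1) (n - 1) 1) with
        | some j => j - ch1
        | none => (n - 1) - ch1

-- ===== PORT B =====
-- groupby: current group value `cur` with accumulated count `cnt`, emit run lengths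
def pvRun (cur : Int) (cnt : Int) : List Int → List Int
  | [] => [cnt]
  | y :: ys => if y = cur then pvRun cur (cnt + 1) ys else cnt :: pvRun y 1 ys

def pvRuns : List Int → List Int
  | [] => []
  | x :: xs => pvRun x 1 xs

def check_label_sequence_alt (labels : List Int) : Int :=
  match pvRuns labels with
  | _ :: r2 :: _ => r2
  | _ => 0

-- ===== PRECONDITION & SPEC =====
def Spec_check_label_sequence (labels : List Int) (out : Int) : Prop := out = check_label_sequence_alt labels
instance (labels : List Int) (out : Int) : Decidable (Spec_check_label_sequence labels out) := by unfold Spec_check_label_sequence; infer_instance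

-- ===== CLAIM (what is proved, stated in full; the proofs are below) =====
def Claim_equal_check_label_sequence : Prop := ∀ (labels : List Int), Dom_check_label_sequence labels → Spec_check_label_sequence labels (check_label_sequence labels)

-- ===== LEMMAS AND PROOFS =====

-- index of the first adjacent change, structurally
def pvChIdx : List Int → Option Nat
  | x :: y :: rest => if x ≠ y then some 0 else (pvChIdx (y :: rest)).map (· + 1)
  | _ => none

-- length of the leading run of value c
def pvLead (c : Int) : List Int → Int
  | [] => 0
  | z :: zs => if z = c then 1 + pvLead c zs else 0

-- the common value: length of the second run
def pvSpec : List Int → Int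
  | x :: y :: rest => if x = y then pvSpec (y :: rest) else 1 + pvLead y rest
  | _ => 0

theorem pvRange_shift (a b : Int) :
    PySem.List.pyRange (a + 1) (b + 1) 1 = (PySem.List.pyRange a b 1).map (· + 1) := by
  rw [PySem.List.pyRange_of_pos a b (by norm_num), PySem.List.pyRange_of_pos (a+1) (b+1) (by norm_num)]
  simp only [List.map_map, Int.ediv_one]
  have he : (if a + 1 < b + 1 then (b + 1 - (a + 1) + 1 - 1).toNat else 0)
       = (if a < b then (b - a + 1 - 1).toNat else 0) := by
    split_ifs with h1 h2 h2 <;> omega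
  rw [he]
  apply List.map_congr_left
  intro k _
  simp only [Function.comp_apply]
  ring

theorem pvFindCh_shift (x : Int) (xs : List Int) (idxs : List Int)
    (h : ∀ i ∈ idxs, 0 ≤ i) :
    pvFindCh (x :: xs) (idxs.map (· + 1)) = (pvFindCh xs idxs).map (· + 1) := by
  induction idxs with
  | nil => simp [pvFindCh]
  | cons i rest ih =>
    have hi : 0 ≤ i := h i (by simp)
    obtain ⟨n, rfl⟩ : ∃ n : Nat, i = (n : Int) := ⟨i.toNat, by omega⟩
    have e1 : PySem.List.pyGet? (x :: xs) ((n : Int) + 1) = PySem.List.pyGet? xs (n : Int) :=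
      PySem.List.pyGet?_cons_succ x xs n
    have e2 : PySem.List.pyGet? (x :: xs) ((n : Int) + 1 + 1) = PySem.List.pyGet? xs ((n : Int) + 1) := by
      have h' := PySem.List.pyGet?_cons_succ x xs (n + 1)
      push_cast at h'
      exact h'
    simp only [List.map_cons, pvFindCh, e1, e2]
    split_ifs with hc
    · rfl
    · exact ih (fun j hj => h j (by simp [hj]))

-- scanning A's loop body from index k finds the first change of `labels.drop k`, shifted by k
theorem pvScan (labels : List Int) : ∀ (k : Nat),
    pvFindCh labels (PySem.List.pyRange (k : Int) ((labels.length : Int) - 1) 1) =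
      (pvChIdx (labels.drop k)).map (fun c => ((c + k : Nat) : Int)) := by
  induction labels with
  | nil =>
    intro k
    have hr : PySem.List.pyRange (k : Int) ((([] : List Int).length : Int) - 1) 1 = [] := by
      rw [PySem.List.pyRange_of_pos _ _ (by norm_num)]
      have h1 : ¬ ((k : Int) < (([] : List Int).length : Int) - 1) := by
        simp only [List.length_nil, Nat.cast_zero]
        omega
      simp [h1]
    rw [hr]
    simp [pvFindCh, pvChIdx]
  | cons x xs ih =>
    have succCase : ∀ (m : Nat),
        pvFindCh (x :: xs) (PySem.List.pyRange ((m + 1 : Nat) : Int) (((x :: xs).length : Int) - 1) 1) =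
          (pvChIdx ((x :: xs).drop (m + 1))).map (fun c => ((c + (m + 1) : Nat) : Int)) := by
      intro m
      have hl : ((x :: xs).length : Int) - 1 = ((xs.length : Int) - 1) + 1 := by
        simp only [List.length_cons]
        push_cast
        ring
      have hm : ((m + 1 : Nat) : Int) = (m : Int) + 1 := by push_cast; ring
      rw [hm, hl, pvRange_shift]
      rw [pvFindCh_shift x xs _ (fun i hi => by
        rcases PySem.List.mem_pyRange_one.mp hi with ⟨h0, _⟩
        omega)]
      rw [ih m]
      cases h : pvChIdx (xs.drop m) with
      | none => simp [h]
      | some c =>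
        simp [h]
        push_cast
        ring
    intro k
    cases k with
    | succ m => exact succCase m
    | zero =>
      cases xs with
      | nil =>
        have : PySem.List.pyRange ((0 : Nat) : Int) ((([x] : List Int).length : Int) - 1) 1 = [] := by
          rw [PySem.List.pyRange_of_pos _ _ (by norm_num)]
          norm_num
        rw [this]
        simp [pvFindCh, pvChIdx]
      | cons y rest =>
        have hn : ((0 : Nat) : Int) < ((x :: y :: rest).length : Int) - 1 := by
          simp only [List.length_cons, Nat.cast_zero]
          push_cast
          omega
        rw [PySem.List.pyRange_one_cons hn]
        simp only [pvFindCh]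
        have e0 : PySem.List.pyGet? (x :: y :: rest) ((0 : Nat) : Int) = some x := by
          simpa using PySem.List.pyGet?_zero_cons x (y :: rest)
        have e1 : PySem.List.pyGet? (x :: y :: rest) (((0 : Nat) : Int) + 1) = some y := by
          have h' := PySem.List.pyGet?_cons_succ x (y :: rest) 0
          simpa using h'
        rw [e0, e1]
        by_cases hxy : x = y
        · rw [if_neg (by simp [hxy])]
          have h1 : ((0 : Nat) : Int) + 1 = ((1 : Nat) : Int) := by norm_num
          rw [h1, succCase 0]
          cases hch : pvChIdx (y :: rest) <;> simp [pvChIdx, hxy, hch]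
        · rw [if_pos (by simp [hxy])]
          simp [pvChIdx, hxy]

theorem pvChIdx_lt {labels : List Int} {c : Nat} (h : pvChIdx labels = some c) :
    c + 1 < labels.length := by
  induction labels generalizing c with
  | nil => simp [pvChIdx] at h
  | cons x xs ih =>
    cases xs with
    | nil => simp [pvChIdx] at h
    | cons y rest =>
      simp only [pvChIdx] at h
      by_cases hxy : x = y
      · rw [if_neg (by simp [hxy])] at h
        cases h' : pvChIdx (y :: rest) with
        | none => rw [h'] at h; simp at h
        | some c' =>
          rw [h'] at h
          simp at h
          subst h
          have hlt' := ih h'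
          simp only [List.length_cons] at hlt' ⊢
          omega
      · rw [if_pos (by simp [hxy])] at h
        simp at h
        subst h
        simp only [List.length_cons]
        omega

theorem pvChIdx_none_spec (labels : List Int) (h : pvChIdx labels = none) : pvSpec labels = 0 := by
  induction labels with
  | nil => rfl
  | cons x xs ih =>
    match xs, ih with
    | [], _ => rfl
    | y :: rest, ih =>
      simp only [pvChIdx] at h
      by_cases hxy : x = y
      · rw [if_neg (by simp [hxy])] at h
        simp only [pvSpec, if_pos hxy]
        exact ih (by simpa using h)
      · rw [if_pos (by simp [hxy])] at h
        simp at h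

theorem pvLead_eq (y : Int) (rest : List Int) :
    pvLead y rest = (match pvChIdx (y :: rest) with
                     | some c => (c : Int)
                     | none => (rest.length : Int)) := by
  induction rest generalizing y with
  | nil => rfl
  | cons z zs ih =>
    by_cases hzy : z = y
    · subst hzy
      have e1 : pvLead z (z :: zs) = 1 + pvLead z zs := by simp [pvLead]
      have e2 : pvChIdx (z :: z :: zs) = (pvChIdx (z :: zs)).map (· + 1) := by simp [pvChIdx]
      rw [e1, e2, ih z]
      cases pvChIdx (z :: zs) <;> simp [add_comm]
    · simp [pvLead, hzy, pvChIdx, Ne.symm hzy]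

theorem pvSpec_some {labels : List Int} {c : Nat} {w : Int} {r : List Int}
    (h : pvChIdx labels = some c) (hd : labels.drop (c + 1) = w :: r) :
    pvSpec labels = 1 + pvLead w r := by
  induction labels generalizing c with
  | nil => simp [pvChIdx] at h
  | cons x xs ih =>
    cases xs with
    | nil => simp [pvChIdx] at h
    | cons y rest =>
      simp only [pvChIdx] at h
      by_cases hxy : x = y
      · rw [if_neg (by simp [hxy])] at h
        cases h' : pvChIdx (y :: rest) with
        | none => rw [h'] at h; simp at h
        | some c' =>
          rw [h'] at h
          simp at h
          subst h
          simp only [pvSpec, if_pos hxy]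
          exact ih h' (by simpa using hd)
      · rw [if_pos (by simp [hxy])] at h
        simp at h
        subst h
        simp only [List.drop_succ_cons, List.drop_zero] at hd
        cases hd
        simp [pvSpec, hxy]

theorem pvA_eq_spec (labels : List Int) : check_label_sequence labels = pvSpec labels := by
  cases h : pvChIdx labels with
  | none =>
    rw [pvChIdx_none_spec labels h]
    unfold check_label_sequence
    by_cases h2 : ((labels.length : Int)) < 2
    · simp [h2]
    · rw [if_neg h2]
      have h0 := pvScan labels 0
      simp only [Nat.cast_zero, List.drop_zero] at h0
      rw [h0, h]
      simp
  | some c =>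
    have hlt := pvChIdx_lt h
    have h2 : ¬ ((labels.length : Int) < 2) := by
      have : 2 ≤ labels.length := by omega
      push_cast
      omega
    unfold check_label_sequence
    rw [if_neg h2]
    have h0 := pvScan labels 0
    simp only [Nat.cast_zero, List.drop_zero] at h0
    rw [h0, h]
    simp only [Option.map_some, Nat.add_zero]
    have hk : ((c : Int) + 1) = ((c + 1 : Nat) : Int) := by push_cast; ring
    rw [hk, pvScan labels (c + 1)]
    have hdl : (labels.drop (c + 1)).length = labels.length - (c + 1) := List.length_drop
    cases hd : labels.drop (c + 1) with
    | nil => rw [hd] at hdl; simp at hdl; omega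
    | cons y r =>
      rw [hd] at hdl
      rw [pvSpec_some h hd, pvLead_eq]
      cases h3 : pvChIdx (y :: r) with
      | some j =>
        simp [h3]
        try push_cast
        try omega
      | none =>
        simp [h3]
        simp only [List.length_cons] at hdl
        push_cast
        omega

-- B side: pvRun decomposes as (cnt + leading run) :: runs of the remainder
def pvDropRun (c : Int) : List Int → List Int
  | [] => []
  | z :: zs => if z = c then pvDropRun c zs else z :: zs

theorem pvRun_decomp (c k : Int) (xs : List Int) :
    pvRun c k xs = (k + pvLead c xs) :: pvRuns (pvDropRun c xs) := by
  induction xs generalizing c k with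
  | nil => simp [pvRun, pvLead, pvDropRun, pvRuns]
  | cons z zs ih =>
    by_cases hz : z = c
    · simp only [pvRun, if_pos hz, pvLead, pvDropRun, ih]
      ring_nf
    · simp [pvRun, hz, pvLead, pvDropRun, pvRuns]

theorem pvB_eq_spec (labels : List Int) : check_label_sequence_alt labels = pvSpec labels := by
  induction labels with
  | nil => rfl
  | cons x xs ih =>
    match xs, ih with
    | [], _ => rfl
    | y :: rest, ih =>
      by_cases hxy : x = y
      · have h1 : check_label_sequence_alt (x :: y :: rest) = check_label_sequence_alt (y :: rest) := by
          simp only [check_label_sequence_alt, pvRuns, pvRun, if_pos (show y = x from hxy.symm)]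
          rw [pvRun_decomp x (1 + 1) rest, pvRun_decomp y 1 rest, hxy]
          cases pvRuns (pvDropRun y rest) <;> rfl
        rw [h1, ih]
        simp [pvSpec, hxy]
      · simp only [check_label_sequence_alt, pvRuns, pvRun,
          if_neg (show ¬ y = x from fun h' => hxy h'.symm)]
        rw [pvRun_decomp y 1 rest]
        simp [pvSpec, hxy]

-- ===== VERDICT (by name: the statement is the Claim_ definition above) =====
theorem check_label_sequence_spec : Claim_equal_check_label_sequence := by
  intro labels _
  unfold Spec_check_label_sequence
  rw [pvA_eq_spec, pvB_eq_spec]
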